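-- pv_equiv track=rewrite | github.com/skoll69/RQ6-Enemy-Generator | tools/dump_rowcount.py | _find_stmt_end
-- ===== SOURCE A (Python) =====
-- def _find_stmt_end(sql: str) -> int:
--     """Return index of the first semicolon that terminates the current SQL statement,
--     skipping those inside quotes or comments. Returns -1 if not found."""
--     i = 0
--     n = len(sql)
--     in_squote = False
--     in_dquote = False
--     in_line_comment = False
--     in_block_comment = False
--     while i < n:
--         ch = sql[i]
--         nxt = sql[i+1] if i + 1 < n else ''
--         if in_line_comment:
--             if ch == '\n':
--                 in_line_comment = False
--             i += 1
--             continue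
--         if in_block_comment:
--             if ch == '*' and nxt == '/':
--                 in_block_comment = False
--                 i += 2
--                 continue
--             i += 1
--             continue
--         if not in_squote and not in_dquote:
--             if ch == '-' and nxt == '-':
--                 in_line_comment = True
--                 i += 2
--                 continue
--             if ch == '#':
--                 in_line_comment = True
--                 i += 1
--                 continue
--             if ch == '/' and nxt == '*':
--                 in_block_comment = True
--                 i += 2
--                 continue
--         if in_squote:
--             if ch == '\\':
--                 i += 2
--                 continue
--             if ch == "'":
--                 in_squote = False
--                 i += 1
--                 continue
--             i += 1
--             continue
--         if in_dquote:
--             if ch == '\\':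
--                 i += 2
--                 continue
--             if ch == '"':
--                 in_dquote = False
--                 i += 1
--                 continue
--             i += 1
--             continue
--         if ch == "'":
--             in_squote = True
--             i += 1
--             continue
--         if ch == '"':
--             in_dquote = True
--             i += 1
--             continue
--         if ch == ';':
--             return i
--         i += 1
--     return -1
-- ===== SOURCE B (Python) =====
-- def _skip_string(sql, i, q):
--     # scan past a string literal opened by quote q (opening quote already consumed);
--     # returns index just past the closing quote, or >= len(sql) if unterminated
--     n = len(sql)
--     while i < n:
--         if sql[i] == '\\':
--             i += 2
--         elif sql[i] == q:
--             return i + 1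
--         else:
--             i += 1
--     return i
--
--
-- def _find_stmt_end(sql: str) -> int:
--     """Return index of the first semicolon that terminates the current SQL statement,
--     skipping those inside quotes or comments. Returns -1 if not found."""
--     n = len(sql)
--     i = 0
--     while i < n:
--         ch = sql[i]
--         if ch == "'" or ch == '"':
--             i = _skip_string(sql, i + 1, ch)
--         elif sql.startswith('--', i) or ch == '#':
--             j = sql.find('\n', i)
--             if j == -1:
--                 return -1
--             i = j + 1
--         elif sql.startswith('/*', i):
--             j = sql.find('*/', i + 2)
--             if j == -1:
--                 return -1
--             i = j + 2
--         elif ch == ';':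
--             return i
--         else:
--             i += 1
--     return -1
-- ===== Notes on version B (the rewrite author's own statement) =====
-- stated objective: idiomatic
-- what changed: Replaced the flag-based per-character state machine with a token scanner: the outer loop sees only neutral code, and whole string literals / comments are skipped in one step by a helper (_skip_string) or by str.find for the comment terminator.
import Mathlib
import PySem

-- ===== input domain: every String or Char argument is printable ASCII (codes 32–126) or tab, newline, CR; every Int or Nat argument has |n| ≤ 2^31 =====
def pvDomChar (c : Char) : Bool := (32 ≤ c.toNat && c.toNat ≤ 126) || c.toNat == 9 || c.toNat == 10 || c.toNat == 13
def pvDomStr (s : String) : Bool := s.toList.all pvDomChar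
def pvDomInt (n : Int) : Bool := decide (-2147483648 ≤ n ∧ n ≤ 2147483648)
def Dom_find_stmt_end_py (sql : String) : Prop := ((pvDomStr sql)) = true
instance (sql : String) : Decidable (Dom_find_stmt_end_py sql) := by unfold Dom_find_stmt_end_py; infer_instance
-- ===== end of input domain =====

-- B replaces A's flag-based per-character state machine by a token scanner that skips
-- whole strings/comments in one step (idiomatic; same cost). Equivalence proved for all inputs.

-- ===== PORT A =====
-- A's single while-loop with four mode flags, transliterated; `nxt` is Option Char
-- (none plays the role of Python's '' when i+1 is out of range).
def findLoopA (s : List Char) (n i : Nat) (sq dq lc bc : Bool) : Int :=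
  if h : i < n then
    let ch : Char := s.getD i ' '
    let nxt : Option Char := if i + 1 < n then some (s.getD (i+1) ' ') else none
    if lc then
      if ch = '\n' then findLoopA s n (i+1) sq dq false bc
      else findLoopA s n (i+1) sq dq lc bc
    else if bc then
      if ch = '*' ∧ nxt = some '/' then findLoopA s n (i+2) sq dq lc false
      else findLoopA s n (i+1) sq dq lc bc
    else if ¬sq ∧ ¬dq ∧ ch = '-' ∧ nxt = some '-' then findLoopA s n (i+2) sq dq true bc
    else if ¬sq ∧ ¬dq ∧ ch = '#' then findLoopA s n (i+1) sq dq true bc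
    else if ¬sq ∧ ¬dq ∧ ch = '/' ∧ nxt = some '*' then findLoopA s n (i+2) sq dq lc true
    else if sq then
      if ch = '\\' then findLoopA s n (i+2) sq dq lc bc
      else if ch = '\'' then findLoopA s n (i+1) false dq lc bc
      else findLoopA s n (i+1) sq dq lc bc
    else if dq then
      if ch = '\\' then findLoopA s n (i+2) sq dq lc bc
      else if ch = '"' then findLoopA s n (i+1) sq false lc bc
      else findLoopA s n (i+1) sq dq lc bc
    else if ch = '\'' then findLoopA s n (i+1) true dq lc bc
    else if ch = '"' then findLoopA s n (i+1) sq true lc bc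
    else if ch = ';' then (i : Int)
    else findLoopA s n (i+1) sq dq lc bc
  else -1
termination_by n - i
decreasing_by all_goals
  first
  | exact Nat.sub_lt_sub_left h (Nat.lt_succ_self i)
  | exact Nat.sub_lt_sub_left h (Nat.lt_add_of_pos_right (by decide))

def find_stmt_end_py (sql : String) : Int :=
  findLoopA sql.toList sql.toList.length 0 false false false false

-- ===== PORT B =====
-- _skip_string: past a string literal opened by quote q; opening quote consumed.
def skipStr (s : List Char) (n i : Nat) (q : Char) : Nat :=
  if h : i < n then
    if s.getD i ' ' = '\\' then skipStr s n (i+2) q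
    else if s.getD i ' ' = q then i + 1
    else skipStr s n (i+1) q
  else i
termination_by n - i
decreasing_by all_goals
  first
  | exact Nat.sub_lt_sub_left h (Nat.lt_succ_self i)
  | exact Nat.sub_lt_sub_left h (Nat.lt_add_of_pos_right (by decide))

def findCh (s : List Char) (n i : Nat) (c : Char) : Option Nat :=
  if h : i < n then
    if s.getD i ' ' = c then some i else findCh s n (i+1) c
  else none
termination_by n - i
decreasing_by all_goals exact Nat.sub_lt_sub_left h (Nat.lt_succ_self i)

def findBE (s : List Char) (n i : Nat) : Option Nat :=
  if h : i + 2 ≤ n then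
    if s.getD i ' ' = '*' ∧ s.getD (i+1) ' ' = '/' then some i else findBE s n (i+1)
  else none
termination_by n - i
decreasing_by all_goals
  exact Nat.sub_lt_sub_left (Nat.lt_of_succ_le (Nat.le_of_succ_le h)) (Nat.lt_succ_self i)

def loopB (s : List Char) (n : Nat) : Nat → Nat → Int
  | 0, _ => -1
  | fuel+1, i =>
    if i < n then
      let ch : Char := s.getD i ' '
      if ch = '\'' ∨ ch = '"' then loopB s n fuel (skipStr s n (i+1) ch)
      else if (ch = '-' ∧ i + 1 < n ∧ s.getD (i+1) ' ' = '-') ∨ ch = '#' then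
        match findCh s n i '\n' with
        | none => -1
        | some k => loopB s n fuel (k+1)
      else if ch = '/' ∧ i + 1 < n ∧ s.getD (i+1) ' ' = '*' then
        match findBE s n (i+2) with
        | none => -1
        | some k => loopB s n fuel (k+2)
      else if ch = ';' then (i : Int)
      else loopB s n fuel (i+1)
    else -1

def find_stmt_end_py_alt (sql : String) : Int :=
  loopB sql.toList sql.toList.length (sql.toList.length + 1) 0

-- ===== PRECONDITION & SPEC =====
def Spec_find_stmt_end_py (sql : String) (out : Int) : Prop := out = find_stmt_end_py_alt sql
instance (sql : String) (out : Int) : Decidable (Spec_find_stmt_end_py sql out) := by unfold Spec_find_stmt_end_py; infer_instance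

-- ===== CLAIM (what is proved, stated in full; the proofs are below) =====
def Claim_equal_find_stmt_end_py : Prop := ∀ (sql : String), Dom_find_stmt_end_py sql → Spec_find_stmt_end_py sql (find_stmt_end_py sql)

-- ===== LEMMAS AND PROOFS =====

theorem skipStr_ge (s : List Char) (n : Nat) (q : Char) : ∀ i, i ≤ skipStr s n i q := by
  have H : ∀ d i, n ≤ i + d → i ≤ skipStr s n i q := by
    intro d
    induction d with
    | zero =>
        intro i hle
        rw [skipStr, dif_neg (by omega)]
    | succ d ih =>
        intro i hle
        rw [skipStr]
        by_cases h : i < n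
        · rw [dif_pos h]
          by_cases h1 : s.getD i ' ' = '\\'
          · rw [if_pos h1]
            exact le_trans (by omega) (ih (i+2) (by omega))
          · rw [if_neg h1]
            by_cases h2 : s.getD i ' ' = q
            · rw [if_pos h2]; omega
            · rw [if_neg h2]
              exact le_trans (by omega) (ih (i+1) (by omega))
        · rw [dif_neg h]
  intro i
  exact H n i (by omega)
-- sql.find('\n', i) : first index ≥ i holding c, as Option
theorem findCh_ge (s : List Char) (n : Nat) (c : Char) :
    ∀ i k, findCh s n i c = some k → i ≤ k := by
  have H : ∀ d i k, n ≤ i + d → findCh s n i c = some k → i ≤ k := by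
    intro d
    induction d with
    | zero =>
        intro i k hle hm
        rw [findCh, dif_neg (by omega)] at hm
        exact absurd hm (by simp)
    | succ d ih =>
        intro i k hle hm
        rw [findCh] at hm
        by_cases h : i < n
        · rw [dif_pos h] at hm
          by_cases h1 : s.getD i ' ' = c
          · rw [if_pos h1] at hm
            exact le_of_eq (Option.some.inj hm)
          · rw [if_neg h1] at hm
            exact le_trans (by omega) (ih (i+1) k (by omega) hm)
        · rw [dif_neg h] at hm
          exact absurd hm (by simp)
  intro i k
  exact H n i k (by omega)
-- sql.find('*/', i) : first index j ≥ i with s[j]='*' and s[j+1]='/' (needs j+2 ≤ n)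
theorem findBE_ge (s : List Char) (n : Nat) :
    ∀ i k, findBE s n i = some k → i ≤ k := by
  have H : ∀ d i k, n ≤ i + d → findBE s n i = some k → i ≤ k := by
    intro d
    induction d with
    | zero =>
        intro i k hle hm
        rw [findBE, dif_neg (by omega)] at hm
        exact absurd hm (by simp)
    | succ d ih =>
        intro i k hle hm
        rw [findBE] at hm
        by_cases h : i + 2 ≤ n
        · rw [dif_pos h] at hm
          by_cases h1 : s.getD i ' ' = '*' ∧ s.getD (i+1) ' ' = '/'
          · rw [if_pos h1] at hm
            exact le_of_eq (Option.some.inj hm)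
          · rw [if_neg h1] at hm
            exact le_trans (by omega) (ih (i+1) k (by omega) hm)
        · rw [dif_neg h] at hm
          exact absurd hm (by simp)
  intro i k
  exact H n i k (by omega)
theorem loopA_sq (s : List Char) (n : Nat) : ∀ j,
    findLoopA s n j true false false false
      = findLoopA s n (skipStr s n j '\'') false false false false := by
  intro j
  fun_induction skipStr s n j '\'' with
  | case1 i h hch ih =>
      simp only [List.getD_eq_getElem?_getD] at hch
      rw [← ih, findLoopA]
      simp [h, hch]
  | case2 i h hne heq =>
      simp only [List.getD_eq_getElem?_getD] at hne heq
      rw [findLoopA]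
      simp [h, heq]
  | case3 i h hne1 hne2 ih =>
      simp only [List.getD_eq_getElem?_getD] at hne1 hne2
      rw [← ih, findLoopA]
      simp [h, hne1, hne2]
  | case4 i h =>
      rw [findLoopA]
      conv_rhs => rw [findLoopA]
      simp [h]

theorem loopA_dq (s : List Char) (n : Nat) : ∀ j,
    findLoopA s n j false true false false
      = findLoopA s n (skipStr s n j '"') false false false false := by
  intro j
  fun_induction skipStr s n j '"' with
  | case1 i h hch ih =>
      simp only [List.getD_eq_getElem?_getD] at hch
      rw [← ih, findLoopA]
      simp [h, hch]
  | case2 i h hne heq =>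
      simp only [List.getD_eq_getElem?_getD] at hne heq
      rw [findLoopA]
      simp [h, heq]
  | case3 i h hne1 hne2 ih =>
      simp only [List.getD_eq_getElem?_getD] at hne1 hne2
      rw [← ih, findLoopA]
      simp [h, hne1, hne2]
  | case4 i h =>
      rw [findLoopA]
      conv_rhs => rw [findLoopA]
      simp [h]

theorem loopA_lc (s : List Char) (n : Nat) : ∀ j,
    findLoopA s n j false false true false
      = match findCh s n j '\n' with
        | none => -1
        | some k => findLoopA s n (k+1) false false false false := by
  intro j
  fun_induction findCh s n j '\n' with
  | case1 i h heq =>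
      simp only [List.getD_eq_getElem?_getD] at heq
      rw [findLoopA]
      simp [h, heq]
  | case2 i h hne ih =>
      simp only [List.getD_eq_getElem?_getD] at hne
      rw [← ih, findLoopA]
      simp [h, hne]
  | case3 i h =>
      rw [findLoopA]
      simp [h]

theorem loopA_bc (s : List Char) (n : Nat) : ∀ j,
    findLoopA s n j false false false true
      = match findBE s n j with
        | none => -1
        | some k => findLoopA s n (k+2) false false false false := by
  intro j
  fun_induction findBE s n j with
  | case1 i h heq =>
      obtain ⟨h1, h2⟩ := heq
      simp only [List.getD_eq_getElem?_getD] at h1 h2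
      have hi : i < n := by omega
      have hi1 : i + 1 < n := by omega
      rw [findLoopA]
      simp [hi, hi1, h1, h2]
  | case2 i h hne ih =>
      have hi : i < n := by omega
      have hi1 : i + 1 < n := by omega
      rw [← ih, findLoopA]
      simp only [List.getD_eq_getElem?_getD] at hne
      simp [hi, hi1]
      intro ha hb
      exact absurd ⟨by simpa using ha, by simpa using hb⟩ hne
  | case3 i h =>
      rw [findLoopA]
      by_cases hi : i < n
      · have hi1 : ¬ (i + 1 < n) := by omega
        simp [hi, hi1]
        rw [findLoopA]
        simp [show ¬ (i + 1 < n) by omega]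
      · simp [hi]
theorem loopA_eq_loopB (s : List Char) (n : Nat) :
    ∀ fuel i, n - i < fuel →
      findLoopA s n i false false false false = loopB s n fuel i := by
  intro fuel
  induction fuel with
  | zero => intro i hfi; omega
  | succ fuel ih =>
    intro i hfi
    by_cases h : i < n
    · by_cases hq : s.getD i ' ' = '\'' ∨ s.getD i ' ' = '"'
      · have hB : loopB s n (fuel+1) i = loopB s n fuel (skipStr s n (i+1) (s.getD i ' ')) := by
          rcases hq with hq|hq <;>
            · have hq' := hq
              simp only [List.getD_eq_getElem?_getD] at hq'
              simp [loopB, h, hq']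
        rw [hB, ← ih _ (by have := skipStr_ge s n (s.getD i ' ') (i+1); omega)]
        rcases hq with hq|hq <;> rw [findLoopA, hq] <;>
          simp only [List.getD_eq_getElem?_getD] at hq <;>
          simp [h, loopA_sq, loopA_dq]
      · have hq' := hq
        simp only [List.getD_eq_getElem?_getD] at hq'
        by_cases hc : (s.getD i ' ' = '-' ∧ i + 1 < n ∧ s.getD (i+1) ' ' = '-') ∨ s.getD i ' ' = '#'
        · have hc' := hc
          simp only [List.getD_eq_getElem?_getD] at hc'
          have hB : loopB s n (fuel+1) i
              = match findCh s n i '\n' with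
                | none => -1
                | some k => loopB s n fuel (k+1) := by
            simp [loopB, h, hq', hc']
          rw [hB]
          rcases hc with ⟨h1, h2, h3⟩ | h1
          · have h1' : s[i]?.getD ' ' = '-' := by
              simpa [List.getD_eq_getElem?_getD] using h1
            have h3' : s[i+1]?.getD ' ' = '-' := by
              simpa [List.getD_eq_getElem?_getD] using h3
            have e1 : findCh s n i '\n' = findCh s n (i+1) '\n' := by
              rw [findCh]; simp [h, h1']
            have e2 : findCh s n (i+1) '\n' = findCh s n (i+2) '\n' := by
              rw [findCh]; simp [h2, h3']
            rw [findLoopA, h1, h3]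
            simp [h, h2]
            rw [loopA_lc, ← e2, ← e1]
            cases hm : findCh s n i '\n' with
            | none => rfl
            | some k =>
              have hk := findCh_ge s n '\n' i k hm
              exact ih (k+1) (by omega)
          · have h1' : s[i]?.getD ' ' = '#' := by
              simpa [List.getD_eq_getElem?_getD] using h1
            have e1 : findCh s n i '\n' = findCh s n (i+1) '\n' := by
              rw [findCh]; simp [h, h1']
            rw [findLoopA, h1]
            simp [h]
            rw [loopA_lc, ← e1]
            cases hm : findCh s n i '\n' with
            | none => rfl
            | some k =>
              have hk := findCh_ge s n '\n' i k hm
              exact ih (k+1) (by omega)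
        · have hc' := hc
          simp only [List.getD_eq_getElem?_getD] at hc'
          by_cases hb : s.getD i ' ' = '/' ∧ i + 1 < n ∧ s.getD (i+1) ' ' = '*'
          · obtain ⟨h1, h2, h3⟩ := hb
            have h1' : s[i]?.getD ' ' = '/' := by
              simpa [List.getD_eq_getElem?_getD] using h1
            have h3' : s[i+1]?.getD ' ' = '*' := by
              simpa [List.getD_eq_getElem?_getD] using h3
            have hB : loopB s n (fuel+1) i
                = match findBE s n (i+2) with
                  | none => -1
                  | some k => loopB s n fuel (k+2) := by
              simp [loopB, h, h1', h2, h3']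
            rw [hB, findLoopA, h1, h3]
            simp [h, h2]
            rw [loopA_bc]
            cases hm : findBE s n (i+2) with
            | none => rfl
            | some k =>
              have hk := findBE_ge s n (i+2) k hm
              exact ih (k+2) (by omega)
          · have hb' := hb
            simp only [List.getD_eq_getElem?_getD] at hb'
            by_cases hs : s.getD i ' ' = ';'
            · have hs' := hs
              simp only [List.getD_eq_getElem?_getD] at hs'
              have hB : loopB s n (fuel+1) i = (i : Int) := by
                simp [loopB, h, hs']
              rw [hB, findLoopA, hs]
              simp [h]
            · have hs' := hs
              simp only [List.getD_eq_getElem?_getD] at hs'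
              have hB : loopB s n (fuel+1) i = loopB s n fuel (i+1) := by
                simp [loopB, h, hq', hc', hb', hs']
              rw [hB, ← ih (i+1) (by omega), findLoopA]
              by_cases hn : i + 1 < n <;> simp [h, hn] <;> split_ifs <;>
                first | rfl | (exfalso; tauto)
    · have hB : loopB s n (fuel+1) i = -1 := by simp [loopB, h]
      rw [hB, findLoopA]
      simp [h]

-- ===== VERDICT (by name: the statement is the Claim_ definition above) =====
theorem find_stmt_end_py_spec : Claim_equal_find_stmt_end_py := by
  intro sql _
  unfold Spec_find_stmt_end_py find_stmt_end_py find_stmt_end_py_alt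
  exact loopA_eq_loopB _ _ _ 0 (by omega)
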